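-- pv_equiv track=rewrite | github.com/LungheSam/IEEEXtreme | 18.0/Preparations/donkeyParadox.py | count_starvation_cells
-- ===== SOURCE A (Python) =====
-- def count_starvation_cells(N, M, haystack1, haystack2):
--     (x1, y1) = haystack1
--     (x2, y2) = haystack2
--     starvation_count = 0
--
--     for i in range(N):
--         for j in range(M):
--             # Skip if the cell is one of the haystacks
--             if ((i, j) == (x1, y1)) or ((i, j) == (x2, y2)):
--                 continue
--
--             # Calculate distances to both haystacks
--             dist1 = abs(i - x1) + abs(j - y1)
--             dist2 = abs(i - x2) + abs(j - y2)
--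
--             # Check if distances are equal
--             if dist1 == dist2:
--                 starvation_count += 1
--
--     return starvation_count
-- ===== SOURCE B (Python) =====
-- def count_starvation_cells(N, M, haystack1, haystack2):
--     (x1, y1) = haystack1
--     (x2, y2) = haystack2
--     if N <= 0 or M <= 0:
--         return 0
--     # distribution of column distance-differences
--     col_diff = {}
--     for j in range(M):
--         d = abs(j - y2) - abs(j - y1)
--         col_diff[d] = col_diff.get(d, 0) + 1
--     total = 0
--     for i in range(N):
--         total += col_diff.get(abs(i - x1) - abs(i - x2), 0)
--     # remove the haystack cells themselves when they lie in the grid and are equidistant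
--     for (hx, hy) in {haystack1, haystack2}:
--         if 0 <= hx < N and 0 <= hy < M:
--             if abs(hx - x1) + abs(hy - y1) == abs(hx - x2) + abs(hy - y2):
--                 total -= 1
--     return total
-- ===== Notes on version B (the rewrite author's own statement) =====
-- stated objective: faster
-- what changed: Replaces the O(N*M) scan of every grid cell by an O(N+M) separable count: a counter of column distance-differences |j-y2|-|j-y1| is built once, each row contributes the count of matching column differences |i-x1|-|i-x2|, and the (deduplicated) haystack cells lying inside the grid are subtracted if equidistant.
import Mathlib
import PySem

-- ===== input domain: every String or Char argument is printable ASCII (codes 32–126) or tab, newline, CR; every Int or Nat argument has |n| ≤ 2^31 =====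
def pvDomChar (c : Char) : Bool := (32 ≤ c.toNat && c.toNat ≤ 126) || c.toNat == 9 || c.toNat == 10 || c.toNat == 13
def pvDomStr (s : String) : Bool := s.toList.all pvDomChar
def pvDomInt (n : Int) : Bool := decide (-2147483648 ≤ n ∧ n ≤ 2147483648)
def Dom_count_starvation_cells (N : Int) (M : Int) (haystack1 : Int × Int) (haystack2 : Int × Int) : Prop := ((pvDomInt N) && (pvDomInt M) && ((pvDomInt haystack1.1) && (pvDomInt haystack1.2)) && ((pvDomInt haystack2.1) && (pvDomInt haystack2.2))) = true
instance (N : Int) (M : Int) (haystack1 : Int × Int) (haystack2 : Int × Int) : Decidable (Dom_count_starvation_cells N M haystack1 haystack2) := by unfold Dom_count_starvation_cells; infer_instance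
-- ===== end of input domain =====

-- B replaces A's scan of every grid cell by a separable count over rows and columns
-- (a counter of column distance-differences, matched per row, minus the haystack cells).

-- ===== PORT A =====
def count_starvation_cells (N : Int) (M : Int) (haystack1 : Int × Int) (haystack2 : Int × Int) : Int :=
  let x1 := haystack1.1
  let y1 := haystack1.2
  let x2 := haystack2.1
  let y2 := haystack2.2
  (PySem.List.pyRange 0 N 1).foldl (fun acc i =>
    (PySem.List.pyRange 0 M 1).foldl (fun acc j =>
      -- Skip if the cell is one of the haystacks
      if (i, j) = (x1, y1) ∨ (i, j) = (x2, y2) then acc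
      else
        -- Calculate distances to both haystacks
        let dist1 := |i - x1| + |j - y1|
        let dist2 := |i - x2| + |j - y2|
        -- Check if distances are equal
        if dist1 = dist2 then acc + 1 else acc) acc) 0

-- ===== PORT B =====
def count_starvation_cells_alt (N : Int) (M : Int) (haystack1 : Int × Int) (haystack2 : Int × Int) : Int :=
  let x1 := haystack1.1
  let y1 := haystack1.2
  let x2 := haystack2.1
  let y2 := haystack2.2
  if N ≤ 0 ∨ M ≤ 0 then 0 else
  -- distribution of column distance-differences
  let colDiff : PySem.Dict Int Int :=
    (PySem.List.pyRange 0 M 1).foldl (fun d j =>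
      let v := |j - y2| - |j - y1|
      d.insert v (d.getD v 0 + 1)) PySem.Dict.empty
  let total : Int :=
    (PySem.List.pyRange 0 N 1).foldl (fun acc i =>
      acc + colDiff.getD (|i - x1| - |i - x2|) 0) 0
  -- remove the haystack cells themselves when they lie in the grid and are equidistant
  (PySem.Set.ofList [haystack1, haystack2]).foldl (fun t p =>
    if 0 ≤ p.1 ∧ p.1 < N ∧ 0 ≤ p.2 ∧ p.2 < M then
      if |p.1 - x1| + |p.2 - y1| = |p.1 - x2| + |p.2 - y2| then t - 1 else t
    else t) total

-- ===== PRECONDITION & SPEC =====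
def Spec_count_starvation_cells (N : Int) (M : Int) (haystack1 : Int × Int) (haystack2 : Int × Int) (out : Int) : Prop := out = count_starvation_cells_alt N M haystack1 haystack2
instance (N : Int) (M : Int) (haystack1 : Int × Int) (haystack2 : Int × Int) (out : Int) : Decidable (Spec_count_starvation_cells N M haystack1 haystack2 out) := by unfold Spec_count_starvation_cells; infer_instance

-- ===== CLAIM (what is proved, stated in full; the proofs are below) =====
def Claim_equal_count_starvation_cells : Prop := ∀ (N : Int) (M : Int) (haystack1 : Int × Int) (haystack2 : Int × Int), Dom_count_starvation_cells N M haystack1 haystack2 → Spec_count_starvation_cells N M haystack1 haystack2 (count_starvation_cells N M haystack1 haystack2)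

-- ===== LEMMAS AND PROOFS =====

-- A's inner loop: a fold with a skip branch counts the non-skipped hits
theorem pv_foldl_skip_count (P Q : Int → Prop) [DecidablePred P] [DecidablePred Q] (l : List Int) (a : Int) :
    l.foldl (fun acc j => if P j then acc else if Q j then acc + 1 else acc) a
      = a + ((l.countP (fun j => decide (¬ P j ∧ Q j)) : Nat) : Int) := by
  induction l generalizing a with
  | nil => simp
  | cons x xs ih =>
      by_cases hp : P x
      · simp [List.foldl_cons, ih, hp]
      · by_cases hq : Q x
        · simp [List.foldl_cons, ih, hp, hq]
          ring
        · simp [List.foldl_cons, ih, hp, hq]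

-- B's counter dict: getD after the insert-fold counts occurrences
theorem pv_counter_getD (gf : Int → Int) (l : List Int) (d : PySem.Dict Int Int) (v : Int) :
    (l.foldl (fun d j => d.insert (gf j) (d.getD (gf j) 0 + 1)) d).getD v 0
      = d.getD v 0 + (((l.map gf).count v : Nat) : Int) := by
  induction l generalizing d with
  | nil => simp
  | cons x xs ih =>
      simp only [List.foldl_cons, ih, List.map_cons, List.count_cons, PySem.Dict.getD_insert]
      by_cases hv : v = gf x
      · subst hv
        simp
        ring
      · have hfx : ¬ gf x = v := fun h => hv h.symm
        simp [hv, hfx]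

-- a fold that never changes its accumulator
theorem pv_foldl_noop (l : List (Int × Int)) (init : Int) :
    l.foldl (fun t (_ : Int × Int) => t) init = init := by
  induction l generalizing init with
  | nil => rfl
  | cons x xs ih => exact ih init

-- counting the elements different from a
theorem pv_countP_ne (l : List Int) (a : Int) :
    ((l.countP (fun j => !(j == a)) : Nat) : Int) = (l.length : Int) - ((l.count a : Nat) : Int) := by
  have hc : l.countP (fun j => !(j == a)) = l.countP (fun j => decide (¬ (j == a) = true)) :=
    List.countP_congr (fun x _ => by simp)
  have h := List.length_eq_countP_add_countP (fun j => (j == a)) (l := l)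
  rw [List.count_eq_countP, hc]
  omega

-- sum of a row value that dips by w exactly at row a (nodup index list)
theorem pv_sum_map_ite_sub (l : List Int) (hl : l.Nodup) (a c w : Int) :
    (l.map (fun i => if i = a then c - w else c)).sum
      = (l.length : Int) * c - (if a ∈ l then w else 0) := by
  induction hl with
  | nil => simp
  | @cons x xs hx hxs ih =>
      simp only [List.map_cons, List.sum_cons, List.length_cons, List.mem_cons, ih]
      by_cases hxa : x = a
      · subst hxa
        have hmem : x ∉ xs := fun hm => (hx x hm) rfl
        rw [if_pos rfl, if_pos (Or.inl rfl : x = x ∨ x ∈ xs), if_neg hmem]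
        push_cast
        ring
      · have hax : ¬ a = x := fun h => hxa h.symm
        by_cases hma : a ∈ xs
        · rw [if_neg hxa, if_pos (Or.inr hma : a = x ∨ a ∈ xs), if_pos hma]
          push_cast
          ring
        · have hno : ¬ (a = x ∨ a ∈ xs) := fun h => h.elim hax hma
          rw [if_neg hxa, if_neg hno, if_neg hma]
          push_cast
          ring

theorem count_starvation_cells_spec_aux :
    ∀ (N M : Int) (x1 y1 x2 y2 : Int),
      count_starvation_cells N M (x1, y1) (x2, y2)
        = count_starvation_cells_alt N M (x1, y1) (x2, y2) := by
  intro N M x1 y1 x2 y2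
  simp only [count_starvation_cells, count_starvation_cells_alt,
    pv_foldl_skip_count, pv_counter_getD, PySem.Dict.getD_empty,
    PySem.List.foldl_add, zero_add, List.count_eq_countP, List.countP_map,
    Function.comp_def]
  by_cases hdeg : N ≤ 0 ∨ M ≤ 0
  · rw [if_pos hdeg]
    rcases hdeg with hN | hM
    · simp [PySem.List.pyRange_one_eq_nil hN]
    · simp [PySem.List.pyRange_one_eq_nil hM]
  rw [if_neg hdeg]
  by_cases hco : x1 = x2 ∧ y1 = y2
  · -- the two haystacks coincide
    obtain ⟨hx, hy⟩ := hco
    subst hx; subst hy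
    have hset : PySem.Set.ofList [(x1, y1), (x1, y1)] = [(x1, y1)] := by
      simp [PySem.Set.ofList, PySem.Set.add, PySem.Set.empty]
    have hMlen : ((PySem.List.pyRange 0 M 1).length : Int) = max M 0 := by
      rw [PySem.List.length_pyRange_one]; omega
    have hNlen : ((PySem.List.pyRange 0 N 1).length : Int) = max N 0 := by
      rw [PySem.List.length_pyRange_one]; omega
    have hcnt : (((PySem.List.pyRange 0 M 1).count y1 : Nat) : Int)
        = if 0 ≤ y1 ∧ y1 < M then 1 else 0 := by
      by_cases hmem : y1 ∈ PySem.List.pyRange 0 M 1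
      · have hb := PySem.List.mem_pyRange_one.mp hmem
        rw [List.count_eq_one_of_mem (PySem.List.nodup_pyRange_one 0 M) hmem]
        simp [hb.1, hb.2]
      · have hnb : ¬ (0 ≤ y1 ∧ y1 < M) := fun h => hmem (PySem.List.mem_pyRange_one.mpr h)
        rw [List.count_eq_zero_of_not_mem hmem]
        simp [hnb]
    have hArow : ∀ i : Int,
        (((PySem.List.pyRange 0 M 1).countP (fun j =>
          decide (¬ ((i, j) = (x1, y1) ∨ (i, j) = (x1, y1)) ∧
            |i - x1| + |j - y1| = |i - x1| + |j - y1|)) : Nat) : Int)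
        = (if i = x1 then (max M 0) - (if 0 ≤ y1 ∧ y1 < M then 1 else 0) else max M 0) := by
      intro i
      by_cases hi : i = x1
      · subst hi
        have hc : ((PySem.List.pyRange 0 M 1).countP (fun j =>
            decide (¬ ((i, j) = (i, y1) ∨ (i, j) = (i, y1)) ∧
              |i - i| + |j - y1| = |i - i| + |j - y1|)))
            = (PySem.List.pyRange 0 M 1).countP (fun j => !(j == y1)) := by
          apply List.countP_congr
          intro j _
          by_cases hj : j = y1
          · subst hj; simp
          · simp [hj, Prod.ext_iff]
        rw [hc, if_pos rfl, pv_countP_ne, hMlen, hcnt]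
      · have hc : ((PySem.List.pyRange 0 M 1).countP (fun j =>
            decide (¬ ((i, j) = (x1, y1) ∨ (i, j) = (x1, y1)) ∧
              |i - x1| + |j - y1| = |i - x1| + |j - y1|)))
            = (PySem.List.pyRange 0 M 1).countP (fun _ => true) := by
          apply List.countP_congr
          intro j _
          simp [Prod.ext_iff, hi]
        rw [hc, if_neg hi]
        simp only [List.countP_true]
        exact hMlen
    have hBrow : ∀ i : Int,
        (((PySem.List.pyRange 0 M 1).countP (fun j =>
          (|j - y1| - |j - y1|) == (|i - x1| - |i - x1|)) : Nat) : Int) = max M 0 := by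
      intro i
      have hc : ((PySem.List.pyRange 0 M 1).countP (fun j =>
          (|j - y1| - |j - y1|) == (|i - x1| - |i - x1|)))
          = (PySem.List.pyRange 0 M 1).countP (fun _ => true) := by
        apply List.countP_congr
        intro j _
        simp
      rw [hc]
      simp only [List.countP_true]
      exact hMlen
    have hAsum : ((PySem.List.pyRange 0 N 1).map (fun i =>
        (((PySem.List.pyRange 0 M 1).countP (fun j =>
          decide (¬ ((i, j) = (x1, y1) ∨ (i, j) = (x1, y1)) ∧
            |i - x1| + |j - y1| = |i - x1| + |j - y1|)) : Nat) : Int))).sum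
        = ((PySem.List.pyRange 0 N 1).length : Int) * (max M 0)
          - (if x1 ∈ PySem.List.pyRange 0 N 1 then (if 0 ≤ y1 ∧ y1 < M then 1 else 0) else 0) := by
      rw [List.map_congr_left (fun i _ => hArow i)]
      exact pv_sum_map_ite_sub _ (PySem.List.nodup_pyRange_one 0 N) x1 (max M 0) _
    have hBsum : ((PySem.List.pyRange 0 N 1).map (fun i =>
        (((PySem.List.pyRange 0 M 1).countP (fun j =>
          (|j - y1| - |j - y1|) == (|i - x1| - |i - x1|)) : Nat) : Int))).sum
        = ((PySem.List.pyRange 0 N 1).length : Int) * (max M 0) := by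
      rw [List.map_congr_left (fun i _ => hBrow i), PySem.List.sum_map_const_int]
    rw [hset, hAsum, hBsum]
    simp only [List.foldl_cons, List.foldl_nil]
    simp only [if_true]
    by_cases hg : 0 ≤ x1 ∧ x1 < N ∧ 0 ≤ y1 ∧ y1 < M
    · have hm : x1 ∈ PySem.List.pyRange 0 N 1 :=
        PySem.List.mem_pyRange_one.mpr ⟨hg.1, hg.2.1⟩
      rw [if_pos hg, if_pos hm, if_pos (⟨hg.2.2.1, hg.2.2.2⟩ : 0 ≤ y1 ∧ y1 < M)]
    · rw [if_neg hg]
      by_cases hm : x1 ∈ PySem.List.pyRange 0 N 1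
      · have hb := PySem.List.mem_pyRange_one.mp hm
        have hcol : ¬ (0 ≤ y1 ∧ y1 < M) := fun hc => hg ⟨hb.1, hb.2, hc.1, hc.2⟩
        rw [if_pos hm, if_neg hcol]
        ring
      · rw [if_neg hm]
        ring
  · -- distinct haystacks: no skipped cell is equidistant, the correction fold is a no-op
    have hrow : ∀ i : Int,
        (((PySem.List.pyRange 0 M 1).countP (fun j =>
          decide (¬ ((i, j) = (x1, y1) ∨ (i, j) = (x2, y2)) ∧
            |i - x1| + |j - y1| = |i - x2| + |j - y2|)) : Nat) : Int)
        = (((PySem.List.pyRange 0 M 1).countP (fun j =>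
          (|j - y2| - |j - y1|) == (|i - x1| - |i - x2|)) : Nat) : Int) := by
      intro i
      congr 1
      apply List.countP_congr
      intro j _
      simp only [decide_eq_true_eq, beq_iff_eq]
      constructor
      · rintro ⟨-, heq⟩
        linarith
      · intro heq
        refine ⟨?_, by linarith⟩
        rintro (hskip | hskip)
        · rw [Prod.mk.injEq] at hskip
          obtain ⟨hi, hj⟩ := hskip
          rw [hi, hj] at heq
          have h1 := abs_nonneg (x1 - x2)
          have h2 := abs_nonneg (y1 - y2)
          have hz1 : |x1 - x1| = (0 : Int) := by simp
          have hz2 : |y1 - y1| = (0 : Int) := by simp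
          have hx0 : |x1 - x2| = (0 : Int) := by linarith
          have hy0 : |y1 - y2| = (0 : Int) := by linarith
          have hxe : x1 - x2 = 0 := abs_eq_zero.mp hx0
          have hye : y1 - y2 = 0 := abs_eq_zero.mp hy0
          exact hco ⟨by linarith, by linarith⟩
        · rw [Prod.mk.injEq] at hskip
          obtain ⟨hi, hj⟩ := hskip
          rw [hi, hj] at heq
          have h1 := abs_nonneg (x1 - x2)
          have h2 := abs_nonneg (y1 - y2)
          have hz1 : |x2 - x2| = (0 : Int) := by simp
          have hz2 : |y2 - y2| = (0 : Int) := by simp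
          have ha1 : |y2 - y1| = |y1 - y2| := abs_sub_comm _ _
          have ha2 : |x2 - x1| = |x1 - x2| := abs_sub_comm _ _
          have hx0 : |x1 - x2| = (0 : Int) := by linarith
          have hy0 : |y1 - y2| = (0 : Int) := by linarith
          have hxe : x1 - x2 = 0 := abs_eq_zero.mp hx0
          have hye : y1 - y2 = 0 := abs_eq_zero.mp hy0
          exact hco ⟨by linarith, by linarith⟩
    have hfold : ∀ init : Int,
        (PySem.Set.ofList [(x1, y1), (x2, y2)]).foldl (fun t p =>
          if 0 ≤ p.1 ∧ p.1 < N ∧ 0 ≤ p.2 ∧ p.2 < M then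
            if |p.1 - x1| + |p.2 - y1| = |p.1 - x2| + |p.2 - y2| then t - 1 else t
          else t) init = init := by
      intro init
      rw [PySem.List.foldl_congr_mem _ _ (fun t (_ : Int × Int) => t) init ?_]
      · exact pv_foldl_noop _ init
      · intro t p hp
        have hmem : p ∈ [(x1, y1), (x2, y2)] := (PySem.Set.mem_ofList _ _).mp hp
        have hpne : ¬ (|p.1 - x1| + |p.2 - y1| = |p.1 - x2| + |p.2 - y2|) := by
          rcases List.mem_pair.mp hmem with hp1 | hp1 <;> subst hp1
          · intro hc
            simp only [sub_self, abs_zero, add_zero] at hc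
            have h1 := abs_nonneg (x1 - x2)
            have h2 := abs_nonneg (y1 - y2)
            have hx0 : |x1 - x2| = (0 : Int) := by linarith
            have hy0 : |y1 - y2| = (0 : Int) := by linarith
            have hxe : x1 - x2 = 0 := abs_eq_zero.mp hx0
            have hye : y1 - y2 = 0 := abs_eq_zero.mp hy0
            exact hco ⟨by linarith, by linarith⟩
          · intro hc
            simp only [sub_self, abs_zero, add_zero] at hc
            have ha1 : |y2 - y1| = |y1 - y2| := abs_sub_comm _ _
            have ha2 : |x2 - x1| = |x1 - x2| := abs_sub_comm _ _
            have h1 := abs_nonneg (x1 - x2)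
            have h2 := abs_nonneg (y1 - y2)
            have hx0 : |x1 - x2| = (0 : Int) := by linarith
            have hy0 : |y1 - y2| = (0 : Int) := by linarith
            have hxe : x1 - x2 = 0 := abs_eq_zero.mp hx0
            have hye : y1 - y2 = 0 := abs_eq_zero.mp hy0
            exact hco ⟨by linarith, by linarith⟩
        by_cases hin : 0 ≤ p.1 ∧ p.1 < N ∧ 0 ≤ p.2 ∧ p.2 < M
        · simp [hin, hpne]
        · simp [hin]
    rw [hfold]
    exact congrArg List.sum (List.map_congr_left (fun i _ => hrow i))

-- ===== VERDICT (by name: the statement is the Claim_ definition above) =====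
theorem count_starvation_cells_spec : Claim_equal_count_starvation_cells := by
  intro N M h1 h2 _
  unfold Spec_count_starvation_cells
  obtain ⟨x1, y1⟩ := h1
  obtain ⟨x2, y2⟩ := h2
  exact count_starvation_cells_spec_aux N M x1 y1 x2 y2
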